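-- pv_equiv track=rewrite | github.com/rescatux/tails-greeter | tailsgreeter/language.py | __fill_locales_dict
-- ===== SOURCE A (Python) =====
-- def language_from_locale(locale):
--     """Obtain the language code from a locale code
--
--     example: fr_FR -> fr"""
--     return locale.split('_')[0]
--
-- def __fill_locales_dict(locales):
--     """assemble dictionary of language codes to corresponding locales list
--
--     example {en: [en_US, en_GB], ...}"""
--     locales_dict = {}
--     for locale in locales:
--         # English = icu.Locale(en_GB)...
--         lang = language_from_locale(locale)
--         if lang not in locales_dict:
--             locales_dict[lang] = []
--         if locale not in locales_dict[lang]: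
--             locales_dict[lang].append(locale)
--     return locales_dict
-- ===== SOURCE B (Python) =====
-- def language_from_locale(locale):
--     """Obtain the language code from a locale code
--
--     example: fr_FR -> fr"""
--     return locale.split('_')[0]
--
--
-- def __fill_locales_dict(locales):
--     """assemble dictionary of language codes to corresponding locales list
--
--     example {en: [en_US, en_GB], ...}"""
--     # pass 1: group every locale (duplicates included) under its language code
--     groups = {}
--     for locale in locales:
--         groups.setdefault(language_from_locale(locale), []).append(locale)
--     # pass 2: rebuild each bucket deduplicated, preserving first-occurrence order
--     return {lang: list(dict.fromkeys(bucket)) for lang, bucket in groups.items()}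
-- ===== Notes on version B (the rewrite author's own statement) =====
-- stated objective: idiomatic
-- what changed: A dedups inline with an O(bucket) list-membership test per locale; B first groups all locales (duplicates kept) with setdefault, then a second pass over the grouped dict dedups each bucket via dict.fromkeys.
import Mathlib
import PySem

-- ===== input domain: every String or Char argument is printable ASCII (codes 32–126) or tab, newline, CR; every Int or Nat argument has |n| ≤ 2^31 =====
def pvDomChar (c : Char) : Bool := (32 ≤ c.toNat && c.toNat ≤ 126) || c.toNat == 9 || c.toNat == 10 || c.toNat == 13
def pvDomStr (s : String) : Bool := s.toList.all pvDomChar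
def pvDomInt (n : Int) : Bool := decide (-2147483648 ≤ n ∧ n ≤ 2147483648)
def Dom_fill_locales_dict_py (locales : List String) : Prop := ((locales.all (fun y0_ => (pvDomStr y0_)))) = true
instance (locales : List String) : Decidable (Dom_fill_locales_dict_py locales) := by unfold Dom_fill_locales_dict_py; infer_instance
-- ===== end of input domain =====

-- B groups all locales first (duplicates kept), then dedups each bucket in a second pass; same return value, different decomposition.

-- ===== PORT A =====
-- locale.split('_')[0]: '_' is a nonempty separator and split never returns an
-- empty list, so both .getD defaults are unreachable.
def language_from_locale (locale : String) : String :=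
  (PySem.List.pyGet? ((PySem.Str.split? locale "_").getD []) 0).getD ""

def fill_locales_dict_py (locales : List String) : List (String × List String) :=
  (locales.foldl (fun d locale =>
      let lang := language_from_locale locale
      let d1 := if d.contains lang then d else d.insert lang ([] : List String)
      -- locales_dict[lang]: lang is present here, so getD's default is unreachable
      if (d1.getD lang []).contains locale then d1
      else d1.insert lang (d1.getD lang [] ++ [locale]))
    PySem.Dict.empty).items

-- ===== PORT B =====
def fill_locales_dict_py_alt (locales : List String) : List (String × List String) :=
  let groups := locales.foldl
    (fun d locale => d.modify (language_from_locale locale) [] (· ++ [locale]))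
    PySem.Dict.empty
  groups.items.map (fun p => (p.1, PySem.List.dedup p.2))

-- ===== PRECONDITION & SPEC =====
def Spec_fill_locales_dict_py (locales : List String) (out : List (String × List String)) : Prop := out = fill_locales_dict_py_alt locales
instance (locales : List String) (out : List (String × List String)) : Decidable (Spec_fill_locales_dict_py locales out) := by unfold Spec_fill_locales_dict_py; infer_instance

-- ===== CLAIM (what is proved, stated in full; the proofs are below) =====
def Claim_equal_fill_locales_dict_py : Prop := ∀ (locales : List String), Dom_fill_locales_dict_py locales → Spec_fill_locales_dict_py locales (fill_locales_dict_py locales)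

-- ===== LEMMAS AND PROOFS =====

-- inserting the value a key already holds is a no-op
theorem insert_getD_self_of_contains {κ ν : Type} [BEq κ] [LawfulBEq κ]
    (d : PySem.Dict κ ν) (k : κ) (dflt : ν) (hc : d.contains k = true)
    (hnd : d.keys.Nodup) : d.insert k (d.getD k dflt) = d := by
  apply PySem.Dict.ext
  rw [PySem.Dict.items_insert_of_contains d _ hc]
  conv_rhs => rw [← List.map_id d.items]
  apply List.map_congr_left
  intro p hp
  by_cases hk : p.1 == k
  · have hk' : p.1 = k := by simpa using hk
    have hmem : (k, p.2) ∈ d.items := by rw [← hk']; simpa using hp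
    have hval : d.getD p.1 dflt = p.2 := by
      rw [hk']; exact PySem.Dict.getD_of_mem_items d hmem hnd dflt
    simp [← hk', hval]
  · simp [hk]

-- one step of A equals one modify-with-Set.add step, on a dict with Nodup keys
theorem stepA_eq_modify (d : PySem.Dict String (List String)) (locale : String)
    (hnd : d.keys.Nodup) :
    (let lang := language_from_locale locale
     let d1 := if d.contains lang then d else d.insert lang ([] : List String)
     if (d1.getD lang []).contains locale then d1
     else d1.insert lang (d1.getD lang [] ++ [locale]))
    = d.modify (language_from_locale locale) [] (fun v => PySem.Set.add v locale) := by
  set lang := language_from_locale locale with hlang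
  unfold PySem.Dict.modify
  by_cases hc : d.contains lang = true
  · simp only [hc, if_true]
    by_cases hin : (d.getD lang []).contains locale = true
    · have hmemv : locale ∈ d.getD lang [] := by simpa using hin
      have hadd : PySem.Set.add (d.getD lang []) locale = d.getD lang [] := by
        simp [PySem.Set.add, PySem.Set.contains, hmemv]
      simp only [hin, if_true, hadd]
      exact (insert_getD_self_of_contains d lang [] hc hnd).symm
    · have hin' : (d.getD lang []).contains locale = false := by simpa using hin
      have hmemv : locale ∉ d.getD lang [] := by simpa using hin'
      simp [PySem.Set.add, PySem.Set.contains, hmemv]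
  · have hc' : d.contains lang = false := by simpa using hc
    simp [hc', PySem.Dict.getD_insert_self, PySem.Set.add, PySem.Set.contains,
      PySem.Dict.insert_insert_self, PySem.Dict.getD_of_not_contains d ([] : List String) hc']

-- A's whole loop equals the modify-with-Set.add loop
theorem foldA_eq_foldModify (locales : List String)
    (d : PySem.Dict String (List String)) (hnd : d.keys.Nodup) :
    locales.foldl (fun d locale =>
      let lang := language_from_locale locale
      let d1 := if d.contains lang then d else d.insert lang ([] : List String)
      if (d1.getD lang []).contains locale then d1
      else d1.insert lang (d1.getD lang [] ++ [locale])) d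
    = locales.foldl
        (fun d locale => d.modify (language_from_locale locale) []
          (fun v => PySem.Set.add v locale)) d := by
  induction locales generalizing d with
  | nil => rfl
  | cons x xs ih =>
    simp only [List.foldl_cons]
    rw [stepA_eq_modify d x hnd]
    apply ih
    have := PySem.Dict.nodup_keys_foldl_modify_key [x] language_from_locale
      ([] : List String) (fun _ x v => PySem.Set.add v x) d hnd
    simpa using this

-- lookup through a keyed modify-loop is a fold over the matching locales
theorem getD_foldl_modify_lang (f : List String → String → List String)
    (l : List String) (d : PySem.Dict String (List String)) (c : String) :
    (l.foldl (fun d x => d.modify (language_from_locale x) [] (fun v => f v x)) d).getD c []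
    = (l.filter (fun x => language_from_locale x == c)).foldl f (d.getD c []) := by
  induction l generalizing d with
  | nil => rfl
  | cons x xs ih =>
    simp only [List.foldl_cons, List.filter_cons]
    by_cases hx : language_from_locale x = c
    · simp only [hx, beq_self_eq_true, if_true, List.foldl_cons]
      rw [ih, PySem.Dict.getD_modify_self]
    · have hbx : (language_from_locale x == c) = false := by simpa using hx
      simp only [hbx, Bool.false_eq_true, if_false]
      rw [ih, PySem.Dict.getD_modify_of_ne _ _ _ (Ne.symm hx)]

-- ===== VERDICT (by name: the statement is the Claim_ definition above) =====
theorem fill_locales_dict_py_spec : Claim_equal_fill_locales_dict_py := by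
  intro locales _
  unfold Spec_fill_locales_dict_py
  have hA : fill_locales_dict_py locales
      = (locales.foldl (fun d locale => d.modify (language_from_locale locale) []
          (fun v => PySem.Set.add v locale)) PySem.Dict.empty).items := by
    unfold fill_locales_dict_py
    rw [foldA_eq_foldModify locales PySem.Dict.empty PySem.Dict.nodup_keys_empty]
  have hB : fill_locales_dict_py_alt locales
      = (locales.foldl (fun d locale => d.modify (language_from_locale locale) []
          (· ++ [locale])) PySem.Dict.empty).items.map
          (fun p => (p.1, PySem.List.dedup p.2)) := rfl
  rw [hA, hB]
  set dA := locales.foldl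
    (fun d locale => d.modify (language_from_locale locale) []
      (fun v => PySem.Set.add v locale)) PySem.Dict.empty with hdA
  set dB := locales.foldl
    (fun d locale => d.modify (language_from_locale locale) [] (· ++ [locale]))
    PySem.Dict.empty with hdB
  have hndA : dA.keys.Nodup := by
    rw [hdA]
    exact PySem.Dict.nodup_keys_foldl_modify_key locales language_from_locale
      ([] : List String) (fun _ x v => PySem.Set.add v x) _ PySem.Dict.nodup_keys_empty
  have hndB : dB.keys.Nodup := by
    rw [hdB]
    exact PySem.Dict.nodup_keys_foldl_modify_key locales language_from_locale
      ([] : List String) (fun _ x v => v ++ [x]) _ PySem.Dict.nodup_keys_empty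
  have hkeys : dA.keys = dB.keys := by
    rw [hdA, hdB,
      PySem.Dict.keys_foldl_modify_key locales language_from_locale
        ([] : List String) (fun _ x v => PySem.Set.add v x) _,
      PySem.Dict.keys_foldl_modify_key locales language_from_locale
        ([] : List String) (fun _ x v => v ++ [x]) _]
  rw [PySem.Dict.items_eq_map_keys dA hndA ([] : List String),
      PySem.Dict.items_eq_map_keys dB hndB ([] : List String),
      hkeys, List.map_map]
  apply List.map_congr_left
  intro c _
  simp only [Function.comp]
  congr 1
  rw [hdA, hdB, getD_foldl_modify_lang (fun v x => PySem.Set.add v x) locales _ c,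
      getD_foldl_modify_lang (fun v x => v ++ [x]) locales _ c,
      PySem.List.foldl_append_singleton_eq_self, PySem.List.dedup_eq_ofList]
  simp only [PySem.Dict.getD_empty, List.nil_append]
  rw [PySem.Set.ofList_eq_foldl]
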